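-- pv_equiv track=rewrite | github.com/HPortuga/SobaBot | bot.py | etiquetador
-- ===== SOURCE A (Python) =====
-- def etiquetador(dicionario, frase):
--   reconhecido = list()
--
--   frase = frase.replace(",", "")
--   palavras = frase.split(" ")
--
--   for palavra in palavras:
--     for key, value in dicionario.items():
--       if (palavra in value):
--         reconhecido.append(str(key + " " + palavra))
--
--   return reconhecido
-- ===== SOURCE B (Python) =====
-- def etiquetador(dicionario, frase):
--   # Build an inverted index word -> [keys whose value-list contains it, in dict order] once;
--   # each word of the phrase is then a single dictionary lookup instead of a scan of every value list.
--   index = {}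
--   for key, value in dicionario.items():
--     for w in dict.fromkeys(value):
--       index.setdefault(w, []).append(key)
--
--   reconhecido = []
--   for palavra in frase.replace(",", "").split(" "):
--     for key in index.get(palavra, []):
--       reconhecido.append(key + " " + palavra)
--   return reconhecido
-- ===== Notes on version B (the rewrite author's own statement) =====
-- stated objective: alternative
-- what changed: B precomputes an inverted index word->keys in one pass over all value lists and then does a single dictionary lookup per word of the phrase, instead of A's rescan of every value list for every word; it trades an O(total value sizes) index build for the removal of the per-word inner scan.
import Mathlib
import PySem

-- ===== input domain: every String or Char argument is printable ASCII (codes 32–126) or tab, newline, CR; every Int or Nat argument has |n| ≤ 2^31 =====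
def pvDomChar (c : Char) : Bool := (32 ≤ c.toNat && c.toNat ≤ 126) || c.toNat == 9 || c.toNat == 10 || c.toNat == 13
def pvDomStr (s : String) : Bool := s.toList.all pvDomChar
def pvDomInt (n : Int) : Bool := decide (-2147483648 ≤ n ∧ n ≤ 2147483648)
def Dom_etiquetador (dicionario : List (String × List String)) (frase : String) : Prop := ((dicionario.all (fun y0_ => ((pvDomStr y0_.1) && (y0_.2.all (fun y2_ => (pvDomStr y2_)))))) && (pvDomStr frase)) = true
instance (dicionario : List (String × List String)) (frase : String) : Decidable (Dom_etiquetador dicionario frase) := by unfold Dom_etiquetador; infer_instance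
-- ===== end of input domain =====

-- B replaces A's per-word rescan of every value list by an inverted index word → keys built once (alternative algorithm).

-- ===== PORT A =====
def etiquetador (dicionario : List (String × List String)) (frase : String) : List String :=
  let frase2 := PySem.Str.replace frase "," ""
  -- split(" "): the separator is the non-empty literal " ", so split? is always some (getD never fires)
  let palavras := (PySem.Str.split? frase2 " ").getD []
  palavras.foldl (fun reconhecido palavra =>
    dicionario.foldl (fun reconhecido kv =>
      if kv.2.contains palavra then reconhecido ++ [kv.1 ++ " " ++ palavra] else reconhecido)
      reconhecido) []

-- ===== PORT B =====
-- index.setdefault(w, []).append(key) = modify w [] (· ++ [key]); dict.fromkeys(value) = PySem.List.dedup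
def etiquetadorIndex (dicionario : List (String × List String)) : PySem.Dict String (List String) :=
  dicionario.foldl (fun index kv =>
    (PySem.List.dedup kv.2).foldl (fun index w => index.modify w [] (· ++ [kv.1])) index)
    PySem.Dict.empty

def etiquetador_alt (dicionario : List (String × List String)) (frase : String) : List String :=
  let index := etiquetadorIndex dicionario
  let palavras := (PySem.Str.split? (PySem.Str.replace frase "," "") " ").getD []
  palavras.foldl (fun reconhecido palavra =>
    (index.getD palavra []).foldl (fun reconhecido key =>
      reconhecido ++ [key ++ " " ++ palavra]) reconhecido) []

-- ===== PRECONDITION & SPEC =====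
def Spec_etiquetador (dicionario : List (String × List String)) (frase : String) (out : List String) : Prop := out = etiquetador_alt dicionario frase
instance (dicionario : List (String × List String)) (frase : String) (out : List String) : Decidable (Spec_etiquetador dicionario frase out) := by unfold Spec_etiquetador; infer_instance

-- ===== CLAIM (what is proved, stated in full; the proofs are below) =====
def Claim_equal_etiquetador : Prop := ∀ (dicionario : List (String × List String)) (frase : String), Dom_etiquetador dicionario frase → Spec_etiquetador dicionario frase (etiquetador dicionario frase)

-- ===== LEMMAS AND PROOFS =====

-- filter (== w) on a duplicate-free list is [w] or []
theorem filter_beq_of_nodup (l : List String) (w : String) (h : l.Nodup) :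
    l.filter (fun x => x == w) = if w ∈ l then [w] else [] := by
  induction l with
  | nil => simp
  | cons a t ih =>
    rw [List.nodup_cons] at h
    by_cases haw : a = w
    · subst haw
      have ht : t.filter (fun x => x == a) = [] := by
        rw [ih h.2, if_neg h.1]
      simp [ht]
    · have hne : w ≠ a := fun e => haw e.symm
      simp [show (a == w) = false by simp [haw], ih h.2, List.mem_cons, hne]

-- the inner fold over one value list, seen through getD
theorem getD_inner (v : List String) (k : String) (d : PySem.Dict String (List String)) (w : String) :
    ((PySem.List.dedup v).foldl (fun d x => d.modify x [] (· ++ [k])) d).getD w []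
      = d.getD w [] ++ (if v.contains w then [k] else []) := by
  have hfold : (PySem.List.dedup v).foldl (fun d x => d.modify x [] (· ++ [k])) d
      = ((PySem.List.dedup v).map (fun x => (x, k))).foldl (fun d p => d.modify p.1 [] (· ++ [p.2])) d := by
    rw [List.foldl_map]
  rw [hfold, PySem.Dict.getD_foldl_modify_append, List.filter_map, List.map_map]
  have : (PySem.List.dedup v).filter ((fun p : String × String => p.1 == w) ∘ (fun x => (x, k)))
      = (PySem.List.dedup v).filter (fun x => x == w) := rfl
  rw [this, filter_beq_of_nodup _ _ (PySem.List.nodup_dedup v)]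
  by_cases hw : w ∈ v
  · simp [hw]
  · simp [hw]

-- the index lookup: exactly the keys (in dict order) whose value list contains w
theorem getD_index_aux (dicionario : List (String × List String)) (w : String)
    (d : PySem.Dict String (List String)) :
    (dicionario.foldl (fun index kv =>
        (PySem.List.dedup kv.2).foldl (fun index x => index.modify x [] (· ++ [kv.1])) index) d).getD w []
      = d.getD w [] ++ (dicionario.filter (fun kv => kv.2.contains w)).map (·.1) := by
  induction dicionario generalizing d with
  | nil => simp
  | cons kv t ih =>
    rw [List.foldl_cons, ih, getD_inner, List.filter_cons]
    by_cases hw : w ∈ kv.2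
    · simp [hw]
    · simp [hw]

theorem getD_index (dicionario : List (String × List String)) (w : String) :
    (etiquetadorIndex dicionario).getD w []
      = (dicionario.filter (fun kv => kv.2.contains w)).map (·.1) := by
  unfold etiquetadorIndex
  rw [getD_index_aux]
  simp

-- per word, both inner loops append the same block
theorem per_word (dicionario : List (String × List String)) (p : String) (acc : List String) :
    dicionario.foldl (fun reconhecido kv =>
      if kv.2.contains p then reconhecido ++ [kv.1 ++ " " ++ p] else reconhecido) acc
    = ((etiquetadorIndex dicionario).getD p []).foldl (fun reconhecido key =>
        reconhecido ++ [key ++ " " ++ p]) acc := by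
  rw [PySem.List.foldl_append_if, PySem.List.foldl_append_singleton_eq_map, getD_index, List.map_map]
  rfl

-- ===== VERDICT (by name: the statement is the Claim_ definition above) =====
theorem etiquetador_spec : Claim_equal_etiquetador := by
  intro dicionario frase _
  unfold Spec_etiquetador etiquetador etiquetador_alt
  apply PySem.List.foldl_congr_mem
  intro acc p _
  exact per_word dicionario p acc
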